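-- pv_equiv track=rewrite | github.com/Dgy2017/FC | RGG2NFA.py | right_split
-- ===== SOURCE A (Python) =====
-- def right_split(str, n, t):
--     l = len(str)
--     for i in range(l + 1):
--         if str[0:i] in t and str[i:l] in n:
--             if str[0:i] == '':
--                 return 'ep', str[i:l]
--             elif str[i:l] == '':
--                 return str[0:i], '_final'
--             else:
--                 return str[0:i], str[i:l]
--     return '', ''
-- ===== SOURCE B (Python) =====
-- def right_split(str, n, t):
--     best = None
--     for p in t:
--         if str.startswith(p) and str[len(p):] in n:
--             if best is None or len(p) < len(best):
--                 best = p
--     if best is None: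
--         return '', ''
--     suffix = str[len(best):]
--     if best == '':
--         return 'ep', suffix
--     if suffix == '':
--         return best, '_final'
--     return best, suffix
-- ===== Notes on version B (the rewrite author's own statement) =====
-- stated objective: faster
-- what changed: B iterates over the candidate prefixes in t (testing startswith and suffix-in-n, keeping the shortest match) instead of scanning all len(str)+1 split positions and testing each slice for list membership in t; the same 'ep'/'_final'/('','') return shapes are kept.
import Mathlib
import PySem

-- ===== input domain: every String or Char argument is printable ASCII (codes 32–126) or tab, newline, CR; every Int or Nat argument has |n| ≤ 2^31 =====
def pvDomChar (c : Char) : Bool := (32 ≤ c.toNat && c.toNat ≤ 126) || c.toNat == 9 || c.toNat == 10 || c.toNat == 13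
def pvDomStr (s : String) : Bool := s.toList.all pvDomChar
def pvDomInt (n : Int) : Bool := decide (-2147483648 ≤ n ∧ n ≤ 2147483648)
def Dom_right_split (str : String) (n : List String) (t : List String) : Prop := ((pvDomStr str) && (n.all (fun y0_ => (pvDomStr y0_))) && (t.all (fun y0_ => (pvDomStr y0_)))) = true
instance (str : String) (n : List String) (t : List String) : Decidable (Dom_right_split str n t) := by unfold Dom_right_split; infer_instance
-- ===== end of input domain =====

-- B iterates over the candidate prefixes in t (keeping the shortest match) instead of scanning
-- every split position of str; same return value, including the 'ep'/'_final'/('','') shapes.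

-- ===== PORT A =====
-- the 'for i in range(l+1)' loop with early return
def rsGoA (strS : String) (n : List String) (t : List String) (l : Int) : List Int → String × String
  | [] => ("", "")
  | i :: rest =>
    let pre := PySem.Str.slice strS (some 0) (some i)
    let suf := PySem.Str.slice strS (some i) (some l)
    if pre ∈ t ∧ suf ∈ n then
      if pre = "" then ("ep", suf)
      else if suf = "" then (pre, "_final")
      else (pre, suf)
    else rsGoA strS n t l rest

def right_split (str : String) (n : List String) (t : List String) : String × String :=
  let l := PySem.Str.len str
  rsGoA str n t l (PySem.List.pyRange 0 (l + 1) 1)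

-- ===== PORT B =====
-- one step of the 'for p in t' loop: keep the shortest matching prefix seen so far
def rsStep (strS : String) (n : List String) (best : Option String) (p : String) : Option String :=
  if PySem.Str.startswith strS p = true ∧ PySem.Str.slice strS (some (PySem.Str.len p)) none ∈ n then
    match best with
    | none => some p
    | some b => if PySem.Str.len p < PySem.Str.len b then some p else some b
  else best

def right_split_alt (str : String) (n : List String) (t : List String) : String × String :=
  match t.foldl (rsStep str n) none with
  | none => ("", "")
  | some b =>
    let suffix := PySem.Str.slice str (some (PySem.Str.len b)) none
    if b = "" then ("ep", suffix)
    else if suffix = "" then (b, "_final")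
    else (b, suffix)

-- ===== PRECONDITION & SPEC =====
def Spec_right_split (str : String) (n : List String) (t : List String) (out : String × String) : Prop := out = right_split_alt str n t
instance (str : String) (n : List String) (t : List String) (out : String × String) : Decidable (Spec_right_split str n t out) := by unfold Spec_right_split; infer_instance

-- ===== CLAIM (what is proved, stated in full; the proofs are below) =====
def Claim_equal_right_split : Prop := ∀ (str : String) (n : List String) (t : List String), Dom_right_split str n t → Spec_right_split str n t (right_split str n t)

-- ===== LEMMAS AND PROOFS =====

-- canonical description shared by both ports
def pvPre (s : String) (k : Nat) : String := String.ofList (s.toList.take k)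
def pvSuf (s : String) (k : Nat) : String := String.ofList (s.toList.drop k)
def pvP (s : String) (n : List String) (t : List String) (k : Nat) : Bool :=
  decide (pvPre s k ∈ t ∧ pvSuf s k ∈ n)
def pvFmt (s : String) (k : Nat) : String × String :=
  if pvPre s k = "" then ("ep", pvSuf s k)
  else if pvSuf s k = "" then (pvPre s k, "_final")
  else (pvPre s k, pvSuf s k)
def pvCanon (s : String) (n : List String) (t : List String) : String × String :=
  match (List.range (s.toList.length + 1)).find? (pvP s n t) with
  | none => ("", "")
  | some k => pvFmt s k

lemma toList_pvPre (s : String) (k : Nat) : (pvPre s k).toList = s.toList.take k := by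
  simp [pvPre]

lemma toList_pvSuf (s : String) (k : Nat) : (pvSuf s k).toList = s.toList.drop k := by
  simp [pvSuf]

lemma slice_pre (s : String) (k : Nat) :
    PySem.Str.slice s (some 0) (some (k : Int)) = pvPre s k := by
  apply String.toList_inj.mp
  have h0 : (0 : Int) = ((0 : Nat) : Int) := rfl
  rw [PySem.Str.toList_slice, PySem.Chars.slice_eq_listSlice, h0,
    PySem.List.slice_natCast, toList_pvPre]
  simp

lemma slice_suf_len (s : String) (k : Nat) (_h : k ≤ s.toList.length) :
    PySem.Str.slice s (some (k : Int)) (some (s.toList.length : Int)) = pvSuf s k := by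
  apply String.toList_inj.mp
  rw [PySem.Str.toList_slice, PySem.Chars.slice_eq_listSlice,
    PySem.List.slice_natCast, toList_pvSuf]
  apply List.take_of_length_le
  simp only [List.length_drop]
  omega

lemma slice_suf_none (s : String) (k : Nat) :
    PySem.Str.slice s (some (k : Int)) none = pvSuf s k := by
  apply String.toList_inj.mp
  rw [PySem.Str.toList_slice, PySem.Chars.slice_eq_listSlice,
    PySem.List.slice_from _ (by positivity : (0:Int) ≤ (k : Int)), toList_pvSuf]
  simp

lemma len_pvPre (s : String) (k : Nat) (h : k ≤ s.toList.length) :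
    (pvPre s k).toList.length = k := by
  rw [toList_pvPre, List.length_take]; omega

lemma prefix_eq_pvPre (s p : String) (h : p.toList <+: s.toList) :
    p = pvPre s p.toList.length ∧ p.toList.length ≤ s.toList.length := by
  constructor
  · apply String.toList_inj.mp
    rw [toList_pvPre]
    exact List.prefix_iff_eq_take.mp h
  · exact h.length_le

-- find? over range' finds the least index satisfying p
lemma find?_range'_min (p : Nat → Bool) :
    ∀ (c j k : Nat), (List.range' j c).find? p = some k →
      ∀ i, i < k → j ≤ i → p i = false := by
  intro c
  induction c with
  | zero => intro j k h; simp at h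
  | succ c ih =>
    intro j k h i hik hji
    rw [List.range'_succ] at h
    by_cases hj : p j = true
    · rw [List.find?_cons_of_pos hj] at h
      injection h with h
      omega
    · rw [List.find?_cons_of_neg (by simpa using hj)] at h
      rcases Nat.eq_or_lt_of_le hji with rfl | hlt
      · simpa using hj
      · exact ih (j + 1) k h i hik hlt

-- A's loop computes the canonical first-split
lemma goA (s : String) (n t : List String) :
    ∀ (c j : Nat), j + c ≤ s.toList.length + 1 →
      rsGoA s n t (s.toList.length : Int)
          (PySem.List.pyRange (j : Int) ((j : Int) + (c : Int)) 1) =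
        (match (List.range' j c).find? (pvP s n t) with
         | none => ("", "")
         | some k => pvFmt s k) := by
  intro c
  induction c with
  | zero =>
    intro j _
    rw [PySem.List.pyRange_one_eq_nil (by omega)]
    simp [rsGoA]
  | succ c ih =>
    intro j h
    rw [PySem.List.pyRange_one_cons (by omega : (j : Int) < (j : Int) + ((c : Nat) + 1 : Nat))]
    rw [List.range'_succ]
    have hj : j ≤ s.toList.length := by omega
    simp only [rsGoA, slice_pre, slice_suf_len s j hj]
    by_cases hc : pvPre s j ∈ t ∧ pvSuf s j ∈ n
    · rw [if_pos hc, List.find?_cons_of_pos (by simpa [pvP] using hc)]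
      simp [pvFmt]
    · rw [if_neg hc, List.find?_cons_of_neg (by simpa [pvP] using hc)]
      have : (j : Int) + ((c : Nat) + 1 : Nat) = ((j + 1 : Nat) : Int) + (c : Int) := by
        push_cast; ring
      rw [this]
      exact ih (j + 1) (by omega)

lemma A_eq_canon (s : String) (n t : List String) :
    right_split s n t = pvCanon s n t := by
  show rsGoA s n t (PySem.Str.len s) (PySem.List.pyRange 0 (PySem.Str.len s + 1) 1) = _
  rw [PySem.Str.len_eq]
  have h0 : (0 : Int) = ((0 : Nat) : Int) := rfl
  have h1 : ((s.toList.length : Int) + 1) = ((0 : Nat) : Int) + ((s.toList.length + 1 : Nat) : Int) := by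
    push_cast; ring
  rw [h0, h1, goA s n t (s.toList.length + 1) 0 (by omega)]
  rw [pvCanon, List.range_eq_range']

-- the condition tested by B's loop body
lemma good_iff (s : String) (n : List String) (p : String) :
    (PySem.Str.startswith s p = true ∧ PySem.Str.slice s (some (PySem.Str.len p)) none ∈ n)
      ↔ (p.toList <+: s.toList ∧ pvSuf s p.toList.length ∈ n) := by
  rw [PySem.Str.startswith_eq, PySem.Chars.startswith_iff, PySem.Str.len_eq,
    slice_suf_none]

-- the min-of-good-candidates loop, abstracted
def pvMin (s : String) : Option String → List String → Option String
  | b, [] => b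
  | b, p :: ps =>
    pvMin s (match b with
      | none => some p
      | some q => if PySem.Str.len p < PySem.Str.len q then some p else some q) ps

lemma fold_eq_min (s : String) (n : List String) :
    ∀ (ts : List String) (b : Option String),
      ts.foldl (rsStep s n) b =
        pvMin s b (ts.filter (fun p => decide (PySem.Str.startswith s p = true ∧
          PySem.Str.slice s (some (PySem.Str.len p)) none ∈ n))) := by
  intro ts
  induction ts with
  | nil => intro b; simp [pvMin]
  | cons p ps ih =>
    intro b
    by_cases hp : PySem.Str.startswith s p = true ∧
        PySem.Str.slice s (some (PySem.Str.len p)) none ∈ n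
    · rw [List.foldl_cons, List.filter_cons_of_pos (by simpa using hp), ih]
      simp only [pvMin, rsStep]
      rw [if_pos hp]
    · rw [List.foldl_cons, List.filter_cons_of_neg (by simpa using hp), ih]
      simp only [rsStep]
      rw [if_neg hp]

lemma pvMin_char (s : String) (k : Nat) (hk : k ≤ s.toList.length) :
    ∀ (F : List String) (b : Option String),
      (∀ p ∈ F, p = pvPre s p.toList.length ∧ k ≤ p.toList.length) →
      (pvPre s k ∈ F ∨ b = some (pvPre s k)) →
      (∀ q, b = some q → q = pvPre s q.toList.length ∧ k ≤ q.toList.length) →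
      pvMin s b F = some (pvPre s k) := by
  intro F
  induction F with
  | nil =>
    intro b _ hmem _
    rcases hmem with h | h
    · simp at h
    · simpa [pvMin] using h
  | cons p ps ih =>
    intro b hinv hmem hb
    have hpinv := hinv p (List.mem_cons_self)
    cases b with
    | none =>
      simp only [pvMin]
      apply ih
      · exact fun q hq => hinv q (List.mem_cons_of_mem _ hq)
      · rcases hmem with h | h
        · rcases List.mem_cons.mp h with rfl | h
          · right; rfl
          · left; exact h
        · simp at h
      · intro q hq
        cases hq; exact hpinv
    | some q =>
      have hqinv := hb q rfl
      simp only [pvMin]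
      by_cases hlt : PySem.Str.len p < PySem.Str.len q
      · rw [if_pos hlt]
        apply ih
        · exact fun r hr => hinv r (List.mem_cons_of_mem _ hr)
        · rcases hmem with h | h
          · rcases List.mem_cons.mp h with rfl | h
            · right; rfl
            · left; exact h
          · -- b = some (pvPre s k); then len q = k ≤ len p contradicts hlt
            exfalso
            have hq : q = pvPre s k := by injection h
            have hlq : q.toList.length = k := by rw [hq]; exact len_pvPre s k hk
            rw [PySem.Str.len_eq, PySem.Str.len_eq, hlq] at hlt
            have := hpinv.2
            omega
        · intro r hr; cases hr; exact hpinv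
      · rw [if_neg hlt]
        apply ih
        · exact fun r hr => hinv r (List.mem_cons_of_mem _ hr)
        · rcases hmem with h | h
          · rcases List.mem_cons.mp h with rfl | h
            · right
              have hlp : (pvPre s k).toList.length = k := len_pvPre s k hk
              rw [PySem.Str.len_eq, PySem.Str.len_eq, hlp] at hlt
              have hqk : q.toList.length = k := by have := hqinv.2; omega
              rw [hqinv.1, hqk]
            · left; exact h
          · right; exact h
        · intro r hr; cases hr; exact hqinv

lemma B_eq_canon (s : String) (n t : List String) :
    right_split_alt s n t = pvCanon s n t := by
  rw [right_split_alt,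
    fold_eq_min s n t none]
  set goodF := fun p => decide (PySem.Str.startswith s p = true ∧
      PySem.Str.slice s (some (PySem.Str.len p)) none ∈ n) with hgoodF
  rw [pvCanon]
  cases hfind : (List.range (s.toList.length + 1)).find? (pvP s n t) with
  | none =>
    have hF : t.filter goodF = [] := by
      rw [List.filter_eq_nil_iff]
      intro p hp hgood
      have hg : p.toList <+: s.toList ∧ pvSuf s p.toList.length ∈ n :=
        (good_iff s n p).mp (by simpa [hgoodF] using hgood)
      obtain ⟨hpeq, hple⟩ := prefix_eq_pvPre s p hg.1
      have hPk : pvP s n t p.toList.length = true := by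
        simp only [pvP, decide_eq_true_eq]
        exact ⟨hpeq ▸ hp, hg.2⟩
      have := List.find?_eq_none.mp hfind p.toList.length
        (List.mem_range.mpr (by omega))
      exact this hPk
    rw [hF]
    simp [pvMin]
  | some k =>
    have hkmem : k < s.toList.length + 1 :=
      List.mem_range.mp (List.mem_of_find?_eq_some hfind)
    have hk : k ≤ s.toList.length := by omega
    have hPk : pvPre s k ∈ t ∧ pvSuf s k ∈ n := by
      have := List.find?_some hfind
      simpa [pvP] using this
    have hmin : ∀ i, i < k → pvP s n t i = false := by
      intro i hik
      exact find?_range'_min (pvP s n t) (s.toList.length + 1) 0 k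
        (by rwa [← List.range_eq_range']) i hik (Nat.zero_le i)
    have hMin : pvMin s none (t.filter goodF) = some (pvPre s k) := by
      apply pvMin_char s k hk
      · intro p hp
        have hpgood := List.of_mem_filter hp
        have hpt := List.mem_of_mem_filter hp
        have hg : p.toList <+: s.toList ∧ pvSuf s p.toList.length ∈ n :=
          (good_iff s n p).mp (by simpa [hgoodF] using hpgood)
        obtain ⟨hpeq, hple⟩ := prefix_eq_pvPre s p hg.1
        refine ⟨hpeq, ?_⟩
        by_contra hc
        have : pvP s n t p.toList.length = false := hmin _ (by omega)
        rw [pvP, decide_eq_false_iff_not] at this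
        exact this ⟨hpeq ▸ hpt, hg.2⟩
      · left
        rw [List.mem_filter]
        refine ⟨hPk.1, ?_⟩
        rw [hgoodF]
        simp only [decide_eq_true_eq]
        apply (good_iff s n (pvPre s k)).mpr
        rw [len_pvPre s k hk, toList_pvPre]
        exact ⟨List.take_prefix _ _, hPk.2⟩
      · intro q hq; cases hq
    rw [hMin]
    have hlenb : PySem.Str.len (pvPre s k) = (k : Int) := by
      rw [PySem.Str.len_eq, len_pvPre s k hk]
    show (let suffix := PySem.Str.slice s (some (PySem.Str.len (pvPre s k))) none
      if pvPre s k = "" then ("ep", suffix)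
      else if suffix = "" then (pvPre s k, "_final")
      else (pvPre s k, suffix)) = pvFmt s k
    rw [hlenb]
    simp only [slice_suf_none, pvFmt]

-- ===== VERDICT (by name: the statement is the Claim_ definition above) =====
theorem right_split_spec : Claim_equal_right_split := by
  intro str n t _
  show right_split str n t = right_split_alt str n t
  rw [A_eq_canon, B_eq_canon]
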